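-- pv_equiv track=rewrite | github.com/njworange/ebs_downloader | mod_auto.py | pick_quality
-- ===== SOURCE A (Python) =====
-- def pick_quality(qualities: dict[str, str], preferred: str) -> tuple[str, str] | tuple[None, None]:
--     quality_orders = {
--         "M50": ["M50", "M20", "M10", "M05"],
--         "M20": ["M20", "M10", "M05"],
--         "M10": ["M10", "M05"],
--         "M05": ["M05"],
--     }
--     for code in quality_orders.get(preferred, ["M50", "M20", "M10", "M05"]):
--         if code in qualities:
--             return code, qualities[code]
--     if qualities:
--         code = sorted(qualities.keys(), reverse=True)[0]
--         return code, qualities[code]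
--     return None, None
-- ===== SOURCE B (Python) =====
-- _RANKS = {"M50": 0, "M20": 1, "M10": 2, "M05": 3}
--
-- def pick_quality(qualities: dict[str, str], preferred: str) -> tuple[str, str] | tuple[None, None]:
--     threshold = _RANKS.get(preferred, 0)
--     best = None  # (rank, code) with the smallest rank seen so far, rank >= threshold
--     for code in qualities:
--         r = _RANKS.get(code)
--         if r is not None and r >= threshold and (best is None or r < best[0]):
--             best = (r, code)
--     if best is not None:
--         return best[1], qualities[best[1]]
--     if qualities:
--         top = max(qualities)
--         return top, qualities[top]
--     return None, None
-- ===== Notes on version B (the rewrite author's own statement) =====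
-- stated objective: alternative
-- what changed: B replaces A's probe of a precomputed preference-order list with a single pass over the available keys tracking the minimum-rank standard code at or below the preferred rank, and uses max() instead of sorted(...)[0] for the fallback.
import Mathlib
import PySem

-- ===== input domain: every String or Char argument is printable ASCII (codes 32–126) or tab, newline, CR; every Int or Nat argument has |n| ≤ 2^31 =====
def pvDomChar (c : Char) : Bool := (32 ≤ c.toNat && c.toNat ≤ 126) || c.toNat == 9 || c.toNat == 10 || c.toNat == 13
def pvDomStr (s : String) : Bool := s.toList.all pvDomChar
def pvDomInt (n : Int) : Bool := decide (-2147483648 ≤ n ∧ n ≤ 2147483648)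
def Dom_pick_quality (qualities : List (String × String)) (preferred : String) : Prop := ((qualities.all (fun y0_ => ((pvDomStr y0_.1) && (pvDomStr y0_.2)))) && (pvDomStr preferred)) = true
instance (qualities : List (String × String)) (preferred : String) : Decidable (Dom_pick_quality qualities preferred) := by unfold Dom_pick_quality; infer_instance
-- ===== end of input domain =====

-- B replaces A's probe of a precomputed preference-order list with a single pass over the
-- available keys tracking the minimum-rank standard code at or below the preferred rank
-- (max() instead of sorted(...)[0] for the fallback); alternative decomposition, same result.

-- ===== PORT A =====
-- the for-loop over the preference order; the [] case is the code after the loop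
def pickLoopA (q : PySem.Dict String String) (order : List String) : Option String × Option String :=
  match order with
  | [] =>
      if !q.items.isEmpty then
        match PySem.List.sorted q.keys (fun x => x) true with
        | [] => (none, none)          -- unreachable: q is nonempty
        | code :: _ => (some code, q.get? code)
      else (none, none)
  | code :: rest =>
      if q.contains code then (some code, q.get? code) else pickLoopA q rest

def pick_quality (qualities : List (String × String)) (preferred : String) : Option String × Option String :=
  let q := PySem.Dict.ofList qualities
  let quality_orders : PySem.Dict String (List String) :=
    PySem.Dict.ofList
      [("M50", ["M50", "M20", "M10", "M05"]),
       ("M20", ["M20", "M10", "M05"]),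
       ("M10", ["M10", "M05"]),
       ("M05", ["M05"])]
  pickLoopA q (quality_orders.getD preferred ["M50", "M20", "M10", "M05"])

-- ===== PORT B =====
def pvRanks : PySem.Dict String Int :=
  PySem.Dict.ofList [("M50", 0), ("M20", 1), ("M10", 2), ("M05", 3)]

-- the body of B's for-loop: one update of best from one key
def bestStep (threshold : Int) (best : Option (Int × String)) (code : String) : Option (Int × String) :=
  match pvRanks.get? code with
  | none => best
  | some r =>
      if decide (threshold ≤ r) && (match best with | none => true | some (br, _) => decide (r < br))
      then some (r, code) else best

-- B's for-loop over the dict's keys, maintaining best = None | (rank, code)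
def bestLoop (threshold : Int) (best : Option (Int × String)) (keys : List String) :
    Option (Int × String) :=
  match keys with
  | [] => best
  | code :: rest => bestLoop threshold (bestStep threshold best code) rest

def pick_quality_alt (qualities : List (String × String)) (preferred : String) : Option String × Option String :=
  let q := PySem.Dict.ofList qualities
  let threshold := pvRanks.getD preferred 0
  match bestLoop threshold none q.keys with
  | some (_, code) => (some code, q.get? code)
  | none =>
      if !q.items.isEmpty then
        match PySem.List.max? q.keys (fun x => x) with
        | some top => (some top, q.get? top)
        | none => (none, none)        -- unreachable: q is nonempty
      else (none, none)

-- ===== PRECONDITION & SPEC =====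
def Spec_pick_quality (qualities : List (String × String)) (preferred : String) (out : Option String × Option String) : Prop := out = pick_quality_alt qualities preferred
instance (qualities : List (String × String)) (preferred : String) (out : Option String × Option String) : Decidable (Spec_pick_quality qualities preferred out) := by unfold Spec_pick_quality; infer_instance

-- ===== CLAIM (what is proved, stated in full; the proofs are below) =====
def Claim_equal_pick_quality : Prop := ∀ (qualities : List (String × String)) (preferred : String), Dom_pick_quality qualities preferred → Spec_pick_quality qualities preferred (pick_quality qualities preferred)

-- ===== LEMMAS AND PROOFS =====

-- what bestLoop computes from an empty accumulator, as membership tests on the keys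
def bestSpec (t : Int) (keys : List String) : Option (Int × String) :=
  if t ≤ 0 ∧ "M50" ∈ keys then some (0, "M50")
  else if t ≤ 1 ∧ "M20" ∈ keys then some (1, "M20")
  else if t ≤ 2 ∧ "M10" ∈ keys then some (2, "M10")
  else if t ≤ 3 ∧ "M05" ∈ keys then some (3, "M05")
  else none

-- left-biased minimum-by-rank on optional (rank, code) pairs
def mergeBest (b s : Option (Int × String)) : Option (Int × String) :=
  match b, s with
  | b, none => b
  | none, s => s
  | some (br, bc), some (r, c) => if r < br then some (r, c) else some (br, bc)

lemma ranks_mk : pvRanks = PySem.Dict.mk [("M50",(0:Int)),("M20",1),("M10",2),("M05",3)] := rfl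

lemma ranks_other (c : String) (h50 : c ≠ "M50") (h20 : c ≠ "M20") (h10 : c ≠ "M10") (h05 : c ≠ "M05") :
    pvRanks.get? c = none := by
  simp [ranks_mk, PySem.Dict.get?_mk_cons, Ne.symm h50, Ne.symm h20, Ne.symm h10, Ne.symm h05,
    PySem.Dict.get?]

lemma mergeBest_none (s : Option (Int × String)) : mergeBest none s = s := by
  cases s <;> rfl

lemma mergeBest_assoc (a b c : Option (Int × String)) :
    mergeBest (mergeBest a b) c = mergeBest a (mergeBest b c) := by
  rcases a with _ | ⟨ar, ac⟩ <;> rcases b with _ | ⟨br, bc⟩ <;> rcases c with _ | ⟨cr, cc⟩ <;>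
    simp [mergeBest] <;> split_ifs <;> simp [mergeBest] <;> split_ifs <;> first | rfl | omega

lemma bestStep_eq (t : Int) (b : Option (Int × String)) (c : String) :
    bestStep t b c = mergeBest b (bestStep t none c) := by
  unfold bestStep
  rcases pvRanks.get? c with _ | r
  · cases b <;> rfl
  · rcases b with _ | ⟨br, bc⟩
    · by_cases h : t ≤ r <;> simp [h, mergeBest]
    · simp only [Bool.and_true, Bool.and_eq_true, decide_eq_true_eq]
      split_ifs with h1 h2 h3 <;> simp_all [mergeBest] <;> omega

lemma bestSpec_cons (t : Int) (c : String) (rest : List String) :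
    bestSpec t (c :: rest) = mergeBest (bestStep t none c) (bestSpec t rest) := by
  by_cases h50 : c = "M50"
  · subst h50
    simp only [bestStep, ranks_mk, PySem.Dict.get?_mk_cons, beq_iff_eq,
      reduceIte, bestSpec, List.mem_cons, String.reduceEq, false_or, true_or,
      true_and, Bool.and_true, decide_eq_true_eq]
    split_ifs <;> simp_all [mergeBest] <;> omega
  · by_cases h20 : c = "M20"
    · subst h20
      simp only [bestStep, ranks_mk, PySem.Dict.get?_mk_cons, beq_iff_eq, String.reduceEq,
        reduceIte, bestSpec, List.mem_cons, false_or, true_or, true_and,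
        Bool.and_true, decide_eq_true_eq]
      split_ifs <;> simp_all [mergeBest] <;> omega
    · by_cases h10 : c = "M10"
      · subst h10
        simp only [bestStep, ranks_mk, PySem.Dict.get?_mk_cons, beq_iff_eq, String.reduceEq,
          reduceIte, bestSpec, List.mem_cons, false_or, true_or, true_and,
          Bool.and_true, decide_eq_true_eq]
        split_ifs <;> simp_all [mergeBest] <;> omega
      · by_cases h05 : c = "M05"
        · subst h05
          simp only [bestStep, ranks_mk, PySem.Dict.get?_mk_cons, beq_iff_eq, String.reduceEq,
            reduceIte, bestSpec, List.mem_cons, false_or, true_or, true_and,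
            Bool.and_true, decide_eq_true_eq]
          split_ifs <;> simp_all [mergeBest] <;> omega
        · rw [show bestStep t none c = none from by simp [bestStep, ranks_other c h50 h20 h10 h05]]
          rw [mergeBest_none]
          simp [bestSpec, h50, h20, h10, h05, Ne.symm h50, Ne.symm h20, Ne.symm h10, Ne.symm h05]

lemma bestLoop_eq_merge (t : Int) (keys : List String) (b : Option (Int × String)) :
    bestLoop t b keys = mergeBest b (bestSpec t keys) := by
  induction keys generalizing b with
  | nil => cases b <;> simp [bestLoop, bestSpec, mergeBest]
  | cons c rest ih =>
      rw [bestLoop, ih, bestStep_eq, mergeBest_assoc, bestSpec_cons]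

lemma head_sorted_rev_eq_max (l : List String) (m : String) (t : List String)
    (h : PySem.List.sorted l (fun x => x) true = m :: t) :
    PySem.List.max? l (fun x => x) = some m := by
  have hm : m ∈ l :=
    (PySem.List.mem_sorted l (fun x => x) true m).mp (h ▸ List.mem_cons_self ..)
  have hne : l ≠ [] := by
    rintro rfl
    rw [(PySem.List.sorted_eq_nil_iff ([] : List String) (fun x => x) true).mpr rfl] at h
    cases h
  obtain ⟨m', hm'⟩ : ∃ m', PySem.List.max? l (fun x => x) = some m' := by
    rcases hopt : PySem.List.max? l (fun x => x) with _ | m'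
    · exact absurd ((PySem.List.max?_eq_none_iff l (fun x => x)).mp hopt) hne
    · exact ⟨m', rfl⟩
  have h1 : m' ≤ m :=
    PySem.List.key_head_sorted_rev_ge l (fun x => x) h m' (PySem.List.max?_mem hm')
  have h2 : m ≤ m' := PySem.List.max?_isMax hm' m hm
  rw [hm', le_antisymm h1 h2]

-- the post-loop fallback of A (head of the reverse-sorted keys) equals B's fallback (max)
lemma fallback_eq (q : PySem.Dict String String) :
    (if !q.items.isEmpty then
      match PySem.List.sorted q.keys (fun x => x) true with
      | [] => ((none : Option String), (none : Option String))
      | code :: _ => (some code, q.get? code)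
    else (none, none)) =
      (if !q.items.isEmpty then
        match PySem.List.max? q.keys (fun x => x) with
        | some top => (some top, q.get? top)
        | none => (none, none)
      else (none, none)) := by
  rcases hq : q.items.isEmpty with _ | _
  · simp only [Bool.not_false, if_true]
    have hk : q.keys ≠ [] := by
      simp only [PySem.Dict.keys]
      intro hmap
      rcases q with ⟨items⟩
      cases items <;> simp_all
    rcases hs : PySem.List.sorted q.keys (fun x => x) true with _ | ⟨m, tl⟩
    · exact absurd ((PySem.List.sorted_eq_nil_iff q.keys (fun x => x) true).mp hs) hk
    · rw [head_sorted_rev_eq_max _ _ _ hs]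
  · simp

-- A's probe of the order list for threshold t equals B's bestSpec/fallback shape
lemma loopA_eq_bestSpec (q : PySem.Dict String String) (t : Int) (order : List String)
    (horder : (t = 0 ∧ order = ["M50", "M20", "M10", "M05"]) ∨
              (t = 1 ∧ order = ["M20", "M10", "M05"]) ∨
              (t = 2 ∧ order = ["M10", "M05"]) ∨
              (t = 3 ∧ order = ["M05"])) :
    pickLoopA q order =
      (match bestSpec t q.keys with
       | some (_, code) => (some code, q.get? code)
       | none =>
          if !q.items.isEmpty then
            match PySem.List.max? q.keys (fun x => x) with
            | some top => (some top, q.get? top)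
            | none => (none, none)
          else (none, none)) := by
  have hc : ∀ c : String, q.contains c = decide (c ∈ q.keys) := by
    intro c
    rcases h : q.contains c with _ | _
    · have : ¬ c ∈ q.keys := fun hmem => by
        have := (PySem.Dict.contains_iff_mem_keys q c).mpr hmem; simp_all
      simp [this]
    · have := (PySem.Dict.contains_iff_mem_keys q c).mp h; simp [this]
  rcases horder with ⟨ht, ho⟩ | ⟨ht, ho⟩ | ⟨ht, ho⟩ | ⟨ht, ho⟩ <;> subst ht <;> subst ho <;>
    simp only [pickLoopA, hc] <;> rw [fallback_eq]
  · by_cases m50 : "M50" ∈ q.keys <;> by_cases m20 : "M20" ∈ q.keys <;>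
      by_cases m10 : "M10" ∈ q.keys <;> by_cases m05 : "M05" ∈ q.keys <;>
      simp [bestSpec, m50, m20, m10, m05]
  · by_cases m20 : "M20" ∈ q.keys <;> by_cases m10 : "M10" ∈ q.keys <;>
      by_cases m05 : "M05" ∈ q.keys <;> simp [bestSpec, m20, m10, m05]
  · by_cases m10 : "M10" ∈ q.keys <;> by_cases m05 : "M05" ∈ q.keys <;>
      simp [bestSpec, m10, m05]
  · by_cases m05 : "M05" ∈ q.keys <;> simp [bestSpec, m05]

-- ===== VERDICT (by name: the statement is the Claim_ definition above) =====
theorem pick_quality_spec : Claim_equal_pick_quality := by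
  intro qualities preferred _
  unfold Spec_pick_quality pick_quality pick_quality_alt
  simp only [bestLoop_eq_merge, mergeBest_none]
  by_cases h50 : preferred = "M50"
  · subst h50; exact loopA_eq_bestSpec _ 0 _ (Or.inl ⟨rfl, rfl⟩)
  · by_cases h20 : preferred = "M20"
    · subst h20; exact loopA_eq_bestSpec _ 1 _ (Or.inr (Or.inl ⟨rfl, rfl⟩))
    · by_cases h10 : preferred = "M10"
      · subst h10; exact loopA_eq_bestSpec _ 2 _ (Or.inr (Or.inr (Or.inl ⟨rfl, rfl⟩)))
      · by_cases h05 : preferred = "M05"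
        · subst h05; exact loopA_eq_bestSpec _ 3 _ (Or.inr (Or.inr (Or.inr ⟨rfl, rfl⟩)))
        · have ho : (PySem.Dict.ofList
              [("M50", ["M50", "M20", "M10", "M05"]),
               ("M20", ["M20", "M10", "M05"]),
               ("M10", ["M10", "M05"]),
               ("M05", ["M05"])]).getD preferred ["M50", "M20", "M10", "M05"]
              = ["M50", "M20", "M10", "M05"] := by
            simp [PySem.Dict.getD_eq_get?_getD, PySem.Dict.get?_mk_cons,
              Ne.symm h50, Ne.symm h20, Ne.symm h10, Ne.symm h05, PySem.Dict.get?,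
              show PySem.Dict.ofList
                [("M50", ["M50", "M20", "M10", "M05"]), ("M20", ["M20", "M10", "M05"]),
                 ("M10", ["M10", "M05"]), ("M05", ["M05"])] =
                PySem.Dict.mk
                  [("M50", ["M50", "M20", "M10", "M05"]), ("M20", ["M20", "M10", "M05"]),
                   ("M10", ["M10", "M05"]), ("M05", ["M05"])] from rfl]
          have hr : pvRanks.getD preferred 0 = 0 := by
            simp [ranks_mk, PySem.Dict.getD_eq_get?_getD, PySem.Dict.get?_mk_cons,
              Ne.symm h50, Ne.symm h20, Ne.symm h10, Ne.symm h05, PySem.Dict.get?]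
          rw [ho, hr]
          exact loopA_eq_bestSpec _ 0 _ (Or.inl ⟨rfl, rfl⟩)
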